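-- pv_equiv track=rewrite | github.com/bdbenzir/Pypie | python_works/pattarn_codes/card_trick.py | choose_high_low
-- ===== SOURCE A (Python) =====
-- def choose_high_low(set, limit):
--     assert len(set) > 1
--     highest = max(set)
--     second_highest = max([x for x in set if x != highest])
--     if highest - second_highest > limit:
--         return min(set)
--     else:
--         return highest
-- ===== SOURCE B (Python) =====
-- def choose_high_low(set, limit):
--     assert len(set) > 1
--     hi = lo = set[0]
--     sec = None
--     for x in set[1:]:
--         if x > hi:
--             sec = hi
--             hi = x
--         elif x < hi and (sec is None or x > sec):
--             sec = x
--         if x < lo: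
--             lo = x
--     if sec is None:
--         raise ValueError("all elements are equal: no second highest")
--     return lo if hi - sec > limit else hi
-- ===== Notes on version B (the rewrite author's own statement) =====
-- stated objective: alternative
-- what changed: Replaced A's three builtin scans (max, max of a filtered copy, min) plus an intermediate filtered list by one explicit loop that maintains running highest, second-highest (largest element strictly below the highest) and minimum.
import Mathlib
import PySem

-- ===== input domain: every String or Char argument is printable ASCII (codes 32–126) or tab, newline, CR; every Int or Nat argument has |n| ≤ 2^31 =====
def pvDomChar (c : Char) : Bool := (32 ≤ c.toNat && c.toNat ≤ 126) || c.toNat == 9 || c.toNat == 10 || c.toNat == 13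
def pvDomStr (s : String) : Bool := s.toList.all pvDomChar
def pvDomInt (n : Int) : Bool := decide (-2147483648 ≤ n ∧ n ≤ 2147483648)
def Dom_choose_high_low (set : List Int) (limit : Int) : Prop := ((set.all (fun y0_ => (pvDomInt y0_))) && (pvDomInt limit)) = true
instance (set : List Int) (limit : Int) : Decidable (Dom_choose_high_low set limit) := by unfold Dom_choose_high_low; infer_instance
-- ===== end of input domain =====

-- B replaces A's three builtin scans (max, max of a filtered copy, min) by one explicit
-- loop maintaining running highest / second-highest / minimum (alternative decomposition).

-- ===== PORT A =====
def choose_high_low (set : List Int) (limit : Int) : Int :=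
  if 1 < set.length then  -- assert len(set) > 1
    match PySem.List.max? set (fun x => x) with
    | none => 0  -- unreachable under the assert (set nonempty)
    | some highest =>
      match PySem.List.max? (set.filter (fun x => x ≠ highest)) (fun x => x) with
      | none => 0  -- Python: ValueError on empty sequence; excluded by Pre_
      | some second_highest =>
        if highest - second_highest > limit then
          match PySem.List.min? set (fun x => x) with
          | none => 0  -- unreachable: set nonempty
          | some m => m
        else highest
  else 0  -- Python: AssertionError; excluded by Pre_

-- ===== PORT B =====
def chlStep (st : Int × Option Int × Int) (x : Int) : Int × Option Int × Int :=
  let hi := st.1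
  let sec := st.2.1
  let lo := st.2.2
  let hs : Int × Option Int :=
    if x > hi then (x, some hi)
    else if x < hi then
      (hi, match sec with
           | none => some x
           | some s => if x > s then some x else some s)
    else (hi, sec)
  (hs.1, hs.2, if x < lo then x else lo)

def choose_high_low_alt (set : List Int) (limit : Int) : Int :=
  if 1 < set.length then  -- assert len(set) > 1
    match set with
    | [] => 0  -- unreachable under the assert
    | h :: t =>
      let st := t.foldl chlStep (h, none, h)
      match st.2.1 with
      | none => 0  -- Python: ValueError, all elements equal; excluded by Pre_
      | some sec => if st.1 - sec > limit then st.2.2 else st.1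
  else 0  -- Python: AssertionError; excluded by Pre_

-- ===== PRECONDITION & SPEC =====
-- Pre_ excludes exactly the inputs where Python A raises: lists of length ≤ 1
-- (AssertionError) and lists whose elements are all equal (ValueError from max([])).
def Pre_choose_high_low (set : List Int) (limit : Int) : Prop :=
  1 < set.length ∧ ∃ x ∈ set, x ≠ set.headI
instance (set : List Int) (limit : Int) : Decidable (Pre_choose_high_low set limit) := by
  unfold Pre_choose_high_low; infer_instance

def pvWitness_choose_high_low : List Int × Int := ([1, 3, 2], 0)

def Spec_choose_high_low (set : List Int) (limit : Int) (out : Int) : Prop := out = choose_high_low_alt set limit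
instance (set : List Int) (limit : Int) (out : Int) : Decidable (Spec_choose_high_low set limit out) := by unfold Spec_choose_high_low; infer_instance

-- ===== CLAIM (what is proved, stated in full; the proofs are below) =====
def Claim_equal_choose_high_low : Prop := ∀ (set : List Int) (limit : Int), Dom_choose_high_low set limit → Pre_choose_high_low set limit → Spec_choose_high_low set limit (choose_high_low set limit)

-- ===== LEMMAS AND PROOFS =====

-- omax l = Python max(l) as an Option (none for the empty list)
def omax : List Int → Option Int
  | [] => none
  | a :: t => some (t.foldl max a)

def mxP (h : Int) (p : List Int) : Int := p.foldl max h
def mnP (h : Int) (p : List Int) : Int := p.foldl min h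
def sdP (h : Int) (p : List Int) : Option Int :=
  omax ((h :: p).filter (fun y => y ≠ mxP h p))

theorem omax_append_singleton (l : List Int) (x : Int) :
    omax (l ++ [x]) = some (match omax l with | none => x | some s => max s x) := by
  cases l with
  | nil => rfl
  | cons a t => simp [omax, List.foldl_append]

theorem if_lt_min (a b : Int) : (if a < b then a else b) = min b a := by
  rw [min_def]; split_ifs <;> omega

theorem chlStep_inv (h x : Int) (p : List Int) :
    chlStep (mxP h p, sdP h p, mnP h p) x = (mxP h (p ++ [x]), sdP h (p ++ [x]), mnP h (p ++ [x])) := by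
  have hmx : mxP h (p ++ [x]) = max (mxP h p) x := by simp [mxP, List.foldl_append]
  have hmn : mnP h (p ++ [x]) = min (mnP h p) x := by simp [mnP, List.foldl_append]
  have hle := PySem.List.le_foldl_max p h
  rw [hmx, hmn, ← if_lt_min]
  rcases lt_trichotomy (mxP h p) x with hlt | heq | hgt
  · -- x strictly above the old max: new second-highest is the old max
    have hmax : max (mxP h p) x = x := max_eq_right hlt.le
    have hsd : sdP h (p ++ [x]) = some (mxP h p) := by
      have hfilt : (h :: p).filter (fun y => y ≠ x) = h :: p := by
        apply List.filter_eq_self.mpr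
        intro y hy
        have hym : y ≤ mxP h p := by
          rcases List.mem_cons.mp hy with rfl | hyp
          · exact hle.1
          · exact hle.2 _ hyp
        simp only [decide_eq_true_eq]
        omega
      have hcons : h :: (p ++ [x]) = (h :: p) ++ [x] := by simp
      simp only [sdP, hmx, hmax, hcons, List.filter_append, hfilt]
      simp [omax, mxP]
    simp only [chlStep, hsd, hmax]
    rw [if_pos hlt]
  · -- x equals the old max: nothing changes except the running min
    have hsd : sdP h (p ++ [x]) = sdP h p := by
      have hcons : h :: (p ++ [x]) = (h :: p) ++ [x] := by simp
      simp only [sdP, hmx, heq, max_self, hcons, List.filter_append]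
      simp
    simp only [chlStep, hsd, heq, max_self]
    rw [if_neg (lt_irrefl x), if_neg (lt_irrefl x)]
  · -- x strictly below the old max: second-highest absorbs x
    have hmax : max (mxP h p) x = mxP h p := max_eq_left hgt.le
    have hsd : sdP h (p ++ [x]) =
        some (match sdP h p with | none => x | some s => max s x) := by
      have hxne : ([x].filter (fun y => y ≠ mxP h p)) = [x] := by
        have : x ≠ mxP h p := by omega
        simp [this]
      have hcons : h :: (p ++ [x]) = (h :: p) ++ [x] := by simp
      simp only [sdP, hmx, hmax, hcons, List.filter_append, hxne]
      rw [omax_append_singleton]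
    simp only [chlStep, hsd, hmax]
    rw [if_neg (by omega : ¬ mxP h p < x), if_pos hgt]
    cases hs : sdP h p with
    | none => rfl
    | some s =>
      by_cases hxs : s < x
      · simp [hxs, max_eq_right hxs.le]
      · have hms : max s x = s := max_eq_left (by omega)
        simp [hxs, hms]

theorem fold_inv (h : Int) (t : List Int) :
    ∀ p, t.foldl chlStep (mxP h p, sdP h p, mnP h p)
       = (mxP h (p ++ t), sdP h (p ++ t), mnP h (p ++ t)) := by
  induction t with
  | nil => intro p; simp
  | cons x t ih =>
    intro p
    simp only [List.foldl_cons, chlStep_inv]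
    rw [ih (p ++ [x])]
    simp

theorem init_state (h : Int) : (h, (none : Option Int), h) = (mxP h [], sdP h [], mnP h []) := by
  simp [mxP, mnP, sdP, omax, List.filter]

-- ===== VERDICT (by name: the statement is the Claim_ definition above) =====
theorem choose_high_low_spec : Claim_equal_choose_high_low := by
  intro set limit _ hpre
  obtain ⟨hlen, y, hy, hyh⟩ := hpre
  unfold Spec_choose_high_low
  cases set with
  | nil => simp at hlen
  | cons h t =>
    have hM : PySem.List.max? (h :: t) (fun y => y) = some (mxP h t) :=
      PySem.List.max?_id_cons h t
    have hm : PySem.List.min? (h :: t) (fun y => y) = some (mnP h t) :=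
      PySem.List.min?_id_cons h t
    -- the filtered list is nonempty: some element differs from the max
    have hne : ∃ z ∈ h :: t, z ≠ mxP h t := by
      by_cases hhm : h = mxP h t
      · refine ⟨y, hy, ?_⟩
        rw [← hhm]
        simpa [List.headI] using hyh
      · exact ⟨h, List.mem_cons_self, hhm⟩
    obtain ⟨z, hz, hzm⟩ := hne
    have hfne : (h :: t).filter (fun x => x ≠ mxP h t) ≠ [] := by
      intro hc
      have : z ∈ (h :: t).filter (fun x => x ≠ mxP h t) :=
        List.mem_filter.mpr ⟨hz, by simp [hzm]⟩
      rw [hc] at this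
      simp at this
    -- B's loop reaches the invariant state
    have hB := fold_inv h t []
    simp only [List.nil_append] at hB
    cases hf : (h :: t).filter (fun x => x ≠ mxP h t) with
    | nil => exact absurd hf hfne
    | cons a r =>
      have hS : PySem.List.max? ((h :: t).filter (fun x => x ≠ mxP h t)) (fun x => x)
              = some (r.foldl max a) := by rw [hf]; exact PySem.List.max?_id_cons a r
      have hsd : sdP h t = some (r.foldl max a) := by
        simp only [sdP, hf, omax]
      unfold choose_high_low choose_high_low_alt
      rw [if_pos hlen, if_pos hlen]
      simp only [hM, hS, init_state h, hB, hsd, hm]
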